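-- pv_equiv track=rewrite | github.com/TheGentleDog/Keyboard-Testing | Thesis/Test12_1_conversational.py | get_context_words
-- ===== SOURCE A (Python) =====
-- def get_context_words(text, n=2):
--     """Get last n complete words before current token"""
--     if not text:
--         return []
--
--     lines = text.split('\n')
--     current_line = lines[-1]
--
--     # Remove current incomplete word
--     if current_line and not current_line.endswith(' '):
--         words = current_line.split()[:-1]
--     else:
--         words = current_line.split()
--
--     # Get previous lines if needed
--     if len(words) < n and len(lines) > 1:
--         for line in reversed(lines[:-1]):
--             words = line.split() + words
--             if len(words) >= n:
--                 break
--
--     return words[-n:] if len(words) >= n else words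
-- ===== SOURCE B (Python) =====
-- def get_context_words(text, n=2):
--     """Get last n complete words before current token"""
--     words = text.split()
--     last = text.split('\n')[-1]
--     # drop the trailing incomplete word (it is the last token of the whole text)
--     if last.split() and not last.endswith(' '):
--         words = words[:-1]
--     return words[-n:]
-- ===== Notes on version B (the rewrite author's own statement) =====
-- stated objective: simpler
-- what changed: B splits the whole text into tokens once and slices the last n, instead of splitting the last line, walking previous lines in reverse with an early break, and re-slicing.
-- outside the precondition, e.g. on get_context_words('a b\nc d', 0): A returns ['c'], B returns ['a', 'b', 'c']; on get_context_words('a b\nc d e', -1): A returns ['d'], B returns ['b', 'c', 'd']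
import Mathlib
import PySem

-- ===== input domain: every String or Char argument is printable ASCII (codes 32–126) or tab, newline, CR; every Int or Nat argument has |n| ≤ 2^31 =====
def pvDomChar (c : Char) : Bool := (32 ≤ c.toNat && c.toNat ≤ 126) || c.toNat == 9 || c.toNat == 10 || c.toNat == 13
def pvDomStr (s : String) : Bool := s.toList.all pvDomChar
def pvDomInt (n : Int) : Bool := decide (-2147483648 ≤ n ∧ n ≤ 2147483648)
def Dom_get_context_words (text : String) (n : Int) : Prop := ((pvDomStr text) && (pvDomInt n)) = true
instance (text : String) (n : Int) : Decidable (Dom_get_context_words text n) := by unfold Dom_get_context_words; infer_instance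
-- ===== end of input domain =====

-- B gathers the last n words with one whole-text split and a slice instead of A's
-- line-by-line reverse accumulation with an early break (objective: simpler).

-- ===== PORT A =====
-- the 'for line in reversed(lines[:-1]): words = line.split() + words; if len(words) >= n: break' loop
def get_context_words_loop (n : Int) : List String → List String → List String
  | [], words => words
  | line :: rest, words =>
      let words := PySem.Str.split₀ line ++ words
      if n ≤ (words.length : Int) then words
      else get_context_words_loop n rest words

def get_context_words (text : String) (n : Int) : List String :=
  if text = "" then []
  else
    let lines : List String := (PySem.Str.split? text "\n").getD []  -- sep "\n" ≠ "", so split? is always `some`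
    match PySem.List.pyGet? lines (-1) with
    | none => []  -- unreachable: str.split('\n') never returns an empty list
    | some current_line =>
      let words : List String :=
        if current_line ≠ "" ∧ PySem.Str.endswith current_line " " = false then
          PySem.List.slice (PySem.Str.split₀ current_line) none (some (-1))
        else PySem.Str.split₀ current_line
      let words : List String :=
        if (words.length : Int) < n ∧ 1 < (lines.length : Int) then
          get_context_words_loop n (PySem.List.slice lines none (some (-1))).reverse words
        else words
      if n ≤ (words.length : Int) then PySem.List.slice words (some (-n)) none else words

-- ===== PORT B =====
def get_context_words_alt (text : String) (n : Int) : List String :=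
  let words := PySem.Str.split₀ text
  let last : String :=
    (PySem.List.pyGet? ((PySem.Str.split? text "\n").getD []) (-1)).getD ""  -- defaults unreachable: split('\n') ≠ []
  let words :=
    if PySem.Str.split₀ last ≠ [] ∧ PySem.Str.endswith last " " = false then
      PySem.List.slice words none (some (-1))
    else words
  PySem.List.slice words (some (-n)) none

-- ===== PRECONDITION & SPEC =====
-- Pre_ excludes non-positive word counts n ≤ 0 (outside the task's natural domain: 'last n words');
-- A's value there — a front-slice of only the last line's words — is an artefact of `words[-n:]`.
def Pre_get_context_words (text : String) (n : Int) : Prop := 1 ≤ n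
instance (text : String) (n : Int) : Decidable (Pre_get_context_words text n) := by unfold Pre_get_context_words; infer_instance

def pvWitness_get_context_words : String × Int := ("alpha beta\ngamma del", 2)

def Spec_get_context_words (text : String) (n : Int) (out : List String) : Prop := out = get_context_words_alt text n
instance (text : String) (n : Int) (out : List String) : Decidable (Spec_get_context_words text n out) := by unfold Spec_get_context_words; infer_instance

-- ===== CLAIM (what is proved, stated in full; the proofs are below) =====
def Claim_equal_get_context_words : Prop := ∀ (text : String) (n : Int), Dom_get_context_words text n → Pre_get_context_words text n → Spec_get_context_words text n (get_context_words text n)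

-- ===== LEMMAS AND PROOFS =====

-- structural newline-split: first line and the remaining lines
def mySplit : List Char → List Char × List (List Char)
  | [] => ([], [])
  | c :: t =>
    let r := mySplit t
    if c = '\n' then ([], r.1 :: r.2) else (c :: r.1, r.2)

theorem go0_acc (s : List Char) : ∀ (cur : List Char) (acc : List (List Char)),
    PySem.Chars.split₀.go s cur acc = acc.reverse ++ PySem.Chars.split₀.go s cur [] := by
  induction s with
  | nil => intro cur acc; simp only [PySem.Chars.split₀.go]; split <;> simp
  | cons c rest ih =>
    intro cur acc
    simp only [PySem.Chars.split₀.go]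
    split
    · split
      · rw [ih [] acc]
      · rw [ih [] (cur.reverse :: acc), ih [] [cur.reverse]]; simp
    · rw [ih (c :: cur) acc]

theorem go0_split (ch : Char) (hsp : PySem.Chars.isspace ch = true) (b : List Char) :
    ∀ (a cur : List Char) (acc : List (List Char)),
      PySem.Chars.split₀.go (a ++ ch :: b) cur acc
        = PySem.Chars.split₀.go a cur acc ++ PySem.Chars.split₀.go b [] [] := by
  intro a
  induction a with
  | nil =>
    intro cur acc
    simp only [List.nil_append, PySem.Chars.split₀.go, hsp, if_true]
    split
    · next hcur => rw [go0_acc b [] acc]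
    · next hcur => rw [go0_acc b [] (cur.reverse :: acc)]
  | cons d a' ih =>
    intro cur acc
    simp only [List.cons_append, PySem.Chars.split₀.go]
    split
    · split
      · rw [ih [] acc]
      · rw [ih [] (cur.reverse :: acc)]
    · rw [ih (d :: cur) acc]

theorem split₀_append_space (ch : Char) (hsp : PySem.Chars.isspace ch = true) (a b : List Char) :
    PySem.Chars.split₀ (a ++ ch :: b) = PySem.Chars.split₀ a ++ PySem.Chars.split₀ b := by
  simp only [PySem.Chars.split₀]
  rw [go0_split ch hsp b a [] []]

theorem mySplit_rebuild (l : List Char) :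
    (mySplit l).1 ++ ((mySplit l).2.map (fun x => '\n' :: x)).flatten = l := by
  induction l with
  | nil => rfl
  | cons c t ih =>
    simp only [mySplit]
    split
    · next h => subst h; simpa using ih
    · simpa using ih

theorem split₀_flatten (tl : List (List Char)) : ∀ h : List Char,
    PySem.Chars.split₀ (h ++ (tl.map (fun x => '\n' :: x)).flatten)
      = PySem.Chars.split₀ h ++ (tl.map PySem.Chars.split₀).flatten := by
  induction tl with
  | nil => intro h; simp
  | cons x tl' ih =>
    intro h
    have hx : h ++ ((List.map (fun x => '\n' :: x) (x :: tl')).flatten)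
        = h ++ '\n' :: (x ++ (tl'.map (fun x => '\n' :: x)).flatten) := by simp
    rw [hx, split₀_append_space '\n' (by decide) h, ih x]
    simp

theorem split₀_eq_flatten (l : List Char) :
    PySem.Chars.split₀ l = (((mySplit l).1 :: (mySplit l).2).map PySem.Chars.split₀).flatten := by
  conv_lhs => rw [← mySplit_rebuild l]
  rw [split₀_flatten (mySplit l).2 (mySplit l).1]
  simp

theorem goOn_eq (fuel : Nat) : ∀ (l cur : List Char) (acc : List (List Char)), l.length < fuel →
    PySem.Chars.splitOn.go ['\n'] fuel l cur acc
      = acc.reverse ++ (cur.reverse ++ (mySplit l).1) :: (mySplit l).2 := by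
  induction fuel with
  | zero => intro l cur acc h; omega
  | succ f ih =>
    intro l cur acc h
    cases l with
    | nil => simp [PySem.Chars.splitOn.go, mySplit]
    | cons c rest =>
      simp only [PySem.Chars.splitOn.go]
      by_cases hc : c = '\n'
      · subst hc
        have hpre : List.isPrefixOf ['\n'] ('\n' :: rest) = true := by simp [List.isPrefixOf]
        simp only [hpre, if_true, List.length_cons, List.drop_succ_cons, List.length_nil,
          List.drop_zero] at *
        rw [ih rest [] (cur.reverse :: acc) (by simpa using Nat.lt_of_succ_lt_succ h)]
        simp [mySplit]
      · have hpre : List.isPrefixOf ['\n'] (c :: rest) = false := by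
          simp [List.isPrefixOf]; exact fun hh => absurd hh.symm hc
        simp only [hpre, Bool.false_eq_true, if_false]
        rw [ih rest (c :: cur) acc (by simpa using Nat.lt_of_succ_lt_succ h)]
        simp [mySplit, hc]

theorem splitOn_eq (l : List Char) :
    PySem.Chars.splitOn l ['\n'] = (mySplit l).1 :: (mySplit l).2 := by
  unfold PySem.Chars.splitOn
  rw [goOn_eq (l.length + 1) l [] [] (by omega)]
  simp

-- the lines list both ports compute
def pvLines (text : String) : List String := (PySem.Str.split? text "\n").getD []

theorem pvLines_eq (text : String) :
    pvLines text = ((mySplit text.toList).1 :: (mySplit text.toList).2).map String.ofList := by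
  unfold pvLines
  simp [PySem.Str.split?, PySem.Chars.split?, splitOn_eq]

theorem pvLines_ne_nil (text : String) : pvLines text ≠ [] := by
  rw [pvLines_eq]; simp

theorem str_split₀_flatten (text : String) :
    PySem.Str.split₀ text = ((pvLines text).map PySem.Str.split₀).flatten := by
  rw [pvLines_eq]
  simp only [PySem.Str.split₀, split₀_eq_flatten text.toList]
  simp only [List.map_map, Function.comp_def]
  rw [List.map_flatten]
  simp [List.map_map, Function.comp_def, PySem.Str.split₀, String.toList_ofList]

theorem slice_neg_append (p w : List String) (n : Int) (h1 : 1 ≤ n) (h2 : n ≤ (w.length : Int)) :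
    PySem.List.slice (p ++ w) (some (-n)) none = PySem.List.slice w (some (-n)) none := by
  have hk : n = ((n.toNat : Nat) : Int) := by omega
  rw [hk, PySem.List.slice_from_neg_natCast _ _ (by omega),
    PySem.List.slice_from_neg_natCast _ _ (by omega)]
  have hlen : (p ++ w).length - n.toNat = p.length + (w.length - n.toNat) := by
    simp [List.length_append]; omega
  rw [hlen, List.drop_length_add_append]

theorem slice_neg_all (w : List String) (n : Int) (h1 : 1 ≤ n) (h2 : (w.length : Int) < n) :
    PySem.List.slice w (some (-n)) none = w := by
  have hk : n = ((n.toNat : Nat) : Int) := by omega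
  rw [hk, PySem.List.slice_from_neg_natCast _ _ (by omega)]
  have hz : w.length - n.toNat = 0 := by omega
  simp [hz]

theorem loop_eq (n : Int) (h1 : 1 ≤ n) : ∀ (rev ws : List String),
    (if n ≤ ((get_context_words_loop n rev ws).length : Int) then
        PySem.List.slice (get_context_words_loop n rev ws) (some (-n)) none
      else get_context_words_loop n rev ws)
      = PySem.List.slice ((rev.reverse.map PySem.Str.split₀).flatten ++ ws) (some (-n)) none := by
  intro rev
  induction rev with
  | nil =>
    intro ws
    simp only [get_context_words_loop, List.reverse_nil, List.map_nil, List.flatten_nil,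
      List.nil_append]
    split
    · rfl
    · next h => exact (slice_neg_all ws n h1 (by omega)).symm
  | cons line rest ih =>
    intro ws
    simp only [get_context_words_loop]
    by_cases hb : n ≤ ((PySem.Str.split₀ line ++ ws).length : Int)
    · simp only [hb, if_true]
      have hx : (((line :: rest).reverse.map PySem.Str.split₀).flatten ++ ws)
          = ((rest.reverse.map PySem.Str.split₀).flatten) ++ (PySem.Str.split₀ line ++ ws) := by
        simp
      rw [hx, slice_neg_append _ _ n h1 hb]
    · simp only [hb, if_false]
      rw [ih (PySem.Str.split₀ line ++ ws)]
      congr 1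
      simp

-- ===== VERDICT (by name: the statement is the Claim_ definition above) =====
theorem get_context_words_spec : Claim_equal_get_context_words := by
  unfold Claim_equal_get_context_words
  intro text n _ hpre
  unfold Spec_get_context_words
  have h1 : (1 : Int) ≤ n := hpre
  by_cases ht : text = ""
  · subst ht
    have hA : get_context_words "" n = [] := by simp [get_context_words]
    rw [hA]
    unfold get_context_words_alt
    have hl : (PySem.List.pyGet? ((PySem.Str.split? "" "\n").getD []) (-1)).getD "" = "" := rfl
    have h2 : PySem.Str.split₀ "" = [] := rfl
    simp [hl, h2, PySem.List.slice_some_none]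
  · have hne : (PySem.Str.split? text "\n").getD [] ≠ [] := pvLines_ne_nil text
    set lines : List String := (PySem.Str.split? text "\n").getD [] with hlinesdef
    have hgl : PySem.List.pyGet? lines (-1) = some (lines.getLast hne) := by
      rw [PySem.List.pyGet?_neg_one]; exact List.getLast?_eq_some_getLast hne
    set L : String := lines.getLast hne with hLdef
    set F : List String := ((lines.dropLast).map PySem.Str.split₀).flatten with hFdef
    set W0 : List String := (if L ≠ "" ∧ PySem.Str.endswith L " " = false then
        PySem.List.slice (PySem.Str.split₀ L) none (some (-1)) else PySem.Str.split₀ L) with hW0def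
    have hflat : PySem.Str.split₀ text = F ++ PySem.Str.split₀ L := by
      rw [str_split₀_flatten]
      conv_lhs => rw [show pvLines text = lines from rfl, ← List.dropLast_append_getLast hne]
      simp only [List.map_append, List.flatten_append, List.map_cons, List.map_nil,
        List.flatten_cons, List.flatten_nil, List.append_nil, ← hFdef, ← hLdef]
    -- B's word list after the conditional drop is F ++ W0
    have hfull : (if PySem.Str.split₀ L ≠ [] ∧ PySem.Str.endswith L " " = false then
          PySem.List.slice (PySem.Str.split₀ text) none (some (-1)) else PySem.Str.split₀ text)
        = F ++ W0 := by
      by_cases hc : PySem.Str.split₀ L ≠ [] ∧ PySem.Str.endswith L " " = false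
      · have hLne : L ≠ "" := fun h => hc.1 (by rw [h]; rfl)
        rw [if_pos hc, hW0def, if_pos ⟨hLne, hc.2⟩, hflat,
          PySem.List.slice_to_neg_one, PySem.List.slice_to_neg_one,
          List.dropLast_append_of_ne_nil hc.1]
      · rw [if_neg hc, hflat]
        congr 1
        by_cases hca : L ≠ "" ∧ PySem.Str.endswith L " " = false
        · have hz : PySem.Str.split₀ L = [] := by
            by_contra hx; exact hc ⟨hx, hca.2⟩
          rw [hW0def, if_pos hca, PySem.List.slice_to_neg_one, hz]
          rfl
        · rw [hW0def, if_neg hca]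
    -- unfold both ports
    unfold get_context_words get_context_words_alt
    rw [if_neg ht]
    simp only [← hlinesdef, hgl, ← hW0def, hfull, Option.getD_some]
    by_cases hrun : (W0.length : Int) < n ∧ 1 < (lines.length : Int)
    · rw [if_pos hrun, PySem.List.slice_to_neg_one]
      have := loop_eq n h1 (lines.dropLast).reverse W0
      rw [List.reverse_reverse, ← hFdef] at this
      exact this
    · rw [if_neg hrun]
      by_cases hW : n ≤ (W0.length : Int)
      · rw [if_pos hW, slice_neg_append F W0 n h1 hW]
      · rw [if_neg hW]
        have hlen1 : lines.length = 1 := by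
          rcases not_and_or.mp hrun with h | h
          · omega
          · have := List.length_pos_of_ne_nil hne
            omega
        have hdrop : lines.dropLast = [] := by
          cases hlx : lines with
          | nil => exact absurd hlx hne
          | cons a t =>
            rw [hlx] at hlen1
            simp at hlen1
            simp [hlen1]
        have hFnil : F = [] := by rw [hFdef, hdrop]; rfl
        rw [hFnil, List.nil_append]
        exact (slice_neg_all W0 n h1 (by omega)).symm
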